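-- pv_equiv track=rewrite | github.com/wangyh-thss/LibMonthlyReport | process.py | merge_paper_addr_by_department
-- ===== SOURCE A (Python) =====
-- def merge_paper_addr_by_department(addresses):
--     keys = dict()
--     for values in addresses:
--         auth, addr_single, order, department = values
--         key = '%s&%s' % ('', department)
--         if key not in keys:
--             keys[key] = values
--         else:
--             _, _, order_existing, _ = keys[key]
--             keys[key] = (auth, addr_single, '%s,%s' % (order_existing, order), department)
--     return keys.values()
-- ===== SOURCE B (Python) =====
-- def merge_paper_addr_by_department(addresses):
--     # Two-pass: group the tuples per department first, then summarize each group.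
--     groups = {}
--     for values in addresses:
--         groups.setdefault(values[3], []).append(values)
--     merged = []
--     for items in groups.values():
--         auth, addr_single, _, department = items[-1]
--         order = items[0][2]
--         for it in items[1:]:
--             order = '%s,%s' % (order, it[2])
--         merged.append((auth, addr_single, order, department))
--     return merged
-- ===== Notes on version B (the rewrite author's own statement) =====
-- stated objective: alternative
-- what changed: A merges each tuple into the aggregate dict entry as it scans; B first groups the full tuples per department with setdefault(...).append and then, in a second pass, summarizes each group (auth/addr/department from the last tuple, orders folded with commas onto the first order).
import Mathlib
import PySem

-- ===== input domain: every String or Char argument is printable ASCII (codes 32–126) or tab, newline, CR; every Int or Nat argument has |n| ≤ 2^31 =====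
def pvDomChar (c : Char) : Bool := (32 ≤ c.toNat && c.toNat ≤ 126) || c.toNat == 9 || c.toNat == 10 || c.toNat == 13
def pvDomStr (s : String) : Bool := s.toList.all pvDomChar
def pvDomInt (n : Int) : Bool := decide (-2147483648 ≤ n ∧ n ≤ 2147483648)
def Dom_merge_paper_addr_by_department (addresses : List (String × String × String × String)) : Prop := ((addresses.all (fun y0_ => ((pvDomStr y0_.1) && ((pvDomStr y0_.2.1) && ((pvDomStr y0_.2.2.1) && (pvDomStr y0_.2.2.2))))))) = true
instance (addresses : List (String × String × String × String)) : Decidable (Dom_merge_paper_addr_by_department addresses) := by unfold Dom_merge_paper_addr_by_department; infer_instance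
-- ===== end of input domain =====

-- B replaces A's single-pass merge-into-a-dict with a two-pass group-then-summarize decomposition (same cost, 'alternative'); equal return values on Dom.
-- ===== PORT A =====
def merge_paper_addr_by_department (addresses : List (String × String × String × String)) : List (String × String × String × String) :=
  let keys := addresses.foldl (fun keys values =>
    let key := "" ++ "&" ++ values.2.2.2      -- '%s&%s' % ('', department)
    if keys.contains key = false then
      keys.insert key values
    else
      let order_existing := (keys.getD key ("", "", "", "")).2.2.1   -- keys[key]: key is present here
      keys.insert key (values.1, values.2.1, order_existing ++ "," ++ values.2.2.1, values.2.2.2))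
    PySem.Dict.empty
  keys.values

-- ===== PORT B =====
-- summarize one department's group: auth/addr/department from items[-1], orders of
-- items[1:] folded onto items[0][2] with ','.  The [] case is unreachable (groups are
-- built by appending, every stored list is nonempty).
def pvSummarize (items : List (String × String × String × String)) : String × String × String × String :=
  match items with
  | [] => ("", "", "", "")
  | first :: rest =>
    let last := (first :: rest).getLast (by simp)          -- items[-1] on a nonempty list: exact
    let order := rest.foldl (fun acc it => acc ++ "," ++ it.2.2.1) first.2.2.1
    (last.1, last.2.1, order, last.2.2.2)

def merge_paper_addr_by_department_alt (addresses : List (String × String × String × String)) : List (String × String × String × String) :=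
  let groups := addresses.foldl (fun g values => g.modify values.2.2.2 [] (· ++ [values])) PySem.Dict.empty
  groups.values.foldl (fun merged items => merged ++ [pvSummarize items]) []

-- ===== PRECONDITION & SPEC =====
def Spec_merge_paper_addr_by_department (addresses : List (String × String × String × String)) (out : List (String × String × String × String)) : Prop := out = merge_paper_addr_by_department_alt addresses
instance (addresses : List (String × String × String × String)) (out : List (String × String × String × String)) : Decidable (Spec_merge_paper_addr_by_department addresses out) := by unfold Spec_merge_paper_addr_by_department; infer_instance

-- ===== CLAIM (what is proved, stated in full; the proofs are below) =====
def Claim_equal_merge_paper_addr_by_department : Prop := ∀ (addresses : List (String × String × String × String)), Dom_merge_paper_addr_by_department addresses → Spec_merge_paper_addr_by_department addresses (merge_paper_addr_by_department addresses)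

-- ===== LEMMAS AND PROOFS =====

-- lift one B-side group entry to the corresponding A-side dict entry
def pvLift (p : String × List (String × String × String × String)) : String × (String × String × String × String) :=
  ("&" ++ p.1, pvSummarize p.2)

lemma pvSummarize_singleton (v : String × String × String × String) : pvSummarize [v] = v := by
  rfl

lemma pvSummarize_snoc (u : List (String × String × String × String)) (hu : u ≠ [])
    (v : String × String × String × String) :
    pvSummarize (u ++ [v]) =
      (v.1, v.2.1, (pvSummarize u).2.2.1 ++ "," ++ v.2.2.1, v.2.2.2) := by
  obtain ⟨f, rest, rfl⟩ := List.exists_cons_of_ne_nil hu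
  simp [pvSummarize, List.foldl_append]

lemma pv_get (its : List (String × List (String × String × String × String))) (k : String) :
    (PySem.Dict.mk (its.map pvLift)).get? ("&" ++ k)
      = ((PySem.Dict.mk its).get? k).map pvSummarize := by
  induction its with
  | nil => simp [PySem.Dict.get?]
  | cons p rest ih =>
      obtain ⟨pk, pv⟩ := p
      by_cases hpk : pk = k
      · simp [PySem.Dict.get?_mk_cons, pvLift, hpk]
      · have hk2 : ¬ ("&" ++ pk = "&" ++ k) := fun hc => hpk ((String.append_right_inj "&").mp hc)
        simp [PySem.Dict.get?_mk_cons, pvLift, hpk, hk2, ih]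

lemma pv_contains (its : List (String × List (String × String × String × String))) (k : String) :
    (PySem.Dict.mk (its.map pvLift)).contains ("&" ++ k)
      = (PySem.Dict.mk its).contains k := by
  rw [PySem.Dict.contains_eq_isSome_get?, PySem.Dict.contains_eq_isSome_get?, pv_get]
  cases (PySem.Dict.mk its).get? k <;> rfl

-- the grouping invariant: A's dict is the pvLift-image of B's group dict
lemma pv_main (l : List (String × String × String × String))
    (its : List (String × List (String × String × String × String)))
    (hne : ∀ p ∈ its, p.2 ≠ []) :
    (l.foldl (fun keys values =>
        let key := "" ++ "&" ++ values.2.2.2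
        if keys.contains key = false then
          keys.insert key values
        else
          let order_existing := (keys.getD key ("", "", "", "")).2.2.1
          keys.insert key (values.1, values.2.1, order_existing ++ "," ++ values.2.2.1, values.2.2.2))
      (PySem.Dict.mk (its.map pvLift))).items
    = ((l.foldl (fun g values => g.modify values.2.2.2 [] (· ++ [values]))
        (PySem.Dict.mk its)).items).map pvLift := by
  induction l generalizing its with
  | nil => simp
  | cons v l ih =>
      simp only [List.foldl_cons, String.empty_append, PySem.Dict.modify]
      by_cases c : (PySem.Dict.mk its).contains v.2.2.2 = true
      · -- the department is already grouped
        obtain ⟨u, hu⟩ : ∃ u, (PySem.Dict.mk its).get? v.2.2.2 = some u := by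
          rw [PySem.Dict.contains_eq_isSome_get?] at c
          exact Option.isSome_iff_exists.mp c
        have hune : u ≠ [] := hne (v.2.2.2, u) (PySem.Dict.mem_items_of_get?_eq_some _ hu)
        have hAc : (PySem.Dict.mk (its.map pvLift)).contains ("&" ++ v.2.2.2) = true := by
          rw [pv_contains]; exact c
        have hAget : (PySem.Dict.mk (its.map pvLift)).getD ("&" ++ v.2.2.2) ("", "", "", "")
            = pvSummarize u := by
          rw [PySem.Dict.getD_eq_get?_getD, pv_get, hu]; rfl
        have hBget : (PySem.Dict.mk its).getD v.2.2.2 [] = u :=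
          PySem.Dict.getD_of_get?_eq_some _ [] hu
        have eB : (PySem.Dict.mk its).insert v.2.2.2 (u ++ [v])
            = PySem.Dict.mk (its.map (fun p => if p.1 == v.2.2.2 then (v.2.2.2, u ++ [v]) else p)) :=
          PySem.Dict.ext (PySem.Dict.items_insert_of_contains _ _ c)
        have eA : (PySem.Dict.mk (its.map pvLift)).insert ("&" ++ v.2.2.2)
              (v.1, v.2.1, (pvSummarize u).2.2.1 ++ "," ++ v.2.2.1, v.2.2.2)
            = PySem.Dict.mk ((its.map (fun p => if p.1 == v.2.2.2 then (v.2.2.2, u ++ [v]) else p)).map pvLift) := by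
          apply PySem.Dict.ext
          rw [PySem.Dict.items_insert_of_contains _ _ hAc]
          show (its.map pvLift).map _ = _
          rw [List.map_map, List.map_map]
          refine List.map_congr_left ?_
          rintro ⟨pk, pu⟩ _
          by_cases hpk : pk = v.2.2.2
          · have : pvSummarize (u ++ [v])
                = (v.1, v.2.1, (pvSummarize u).2.2.1 ++ "," ++ v.2.2.1, v.2.2.2) :=
              pvSummarize_snoc u hune v
            simp [pvLift, hpk, this]
          · have hk2 : ¬ ("&" ++ pk = "&" ++ v.2.2.2) :=
              fun hc => hpk ((String.append_right_inj "&").mp hc)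
            simp [pvLift, hpk, hk2]
        have hne' : ∀ p ∈ its.map (fun p => if p.1 == v.2.2.2 then (v.2.2.2, u ++ [v]) else p), p.2 ≠ [] := by
          intro p hp
          obtain ⟨q, hq, rfl⟩ := List.mem_map.mp hp
          by_cases hqk : q.1 = v.2.2.2
          · simp [hqk]
          · simpa [hqk] using hne q hq
        simp only [hAc, hAget, hBget, Bool.true_eq_false, if_false, eA, eB]
        exact ih _ hne'
      · -- a fresh department
        have c' : (PySem.Dict.mk its).contains v.2.2.2 = false := Bool.eq_false_iff.mpr c
        have hAc : (PySem.Dict.mk (its.map pvLift)).contains ("&" ++ v.2.2.2) = false := by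
          rw [pv_contains]; exact c'
        have hBget : (PySem.Dict.mk its).getD v.2.2.2 [] = [] :=
          PySem.Dict.getD_of_not_contains _ [] c'
        have eB : (PySem.Dict.mk its).insert v.2.2.2 [v]
            = PySem.Dict.mk (its ++ [(v.2.2.2, [v])]) :=
          PySem.Dict.ext (PySem.Dict.items_insert_of_not_contains _ _ c')
        have eA : (PySem.Dict.mk (its.map pvLift)).insert ("&" ++ v.2.2.2) v
            = PySem.Dict.mk ((its ++ [(v.2.2.2, [v])]).map pvLift) := by
          apply PySem.Dict.ext
          rw [PySem.Dict.items_insert_of_not_contains _ _ hAc]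
          simp [pvLift, pvSummarize_singleton]
        have hne' : ∀ p ∈ its ++ [(v.2.2.2, [v])], p.2 ≠ [] := by
          intro p hp
          rcases List.mem_append.mp hp with h | h
          · exact hne p h
          · simp at h; simp [h]
        simp only [hAc, if_true, hBget, List.nil_append, eA, eB]
        exact ih _ hne'

-- ===== VERDICT (by name: the statement is the Claim_ definition above) =====
theorem merge_paper_addr_by_department_spec : Claim_equal_merge_paper_addr_by_department := by
  intro addresses _
  unfold Spec_merge_paper_addr_by_department merge_paper_addr_by_department merge_paper_addr_by_department_alt
  have h := pv_main addresses [] (by simp)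
  simp only [List.map_nil] at h
  simp only [PySem.Dict.values, PySem.List.foldl_append_singleton_eq_map]
  rw [show (PySem.Dict.empty : PySem.Dict String (String × String × String × String)) = PySem.Dict.mk [] from rfl,
      show (PySem.Dict.empty : PySem.Dict String (List (String × String × String × String))) = PySem.Dict.mk [] from rfl,
      h, List.map_map, List.map_map]
  rfl
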